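-- pv_equiv track=rewrite | github.com/gravity-tak/interactive-tempest | itempest/lib/lib_tags.py | find_a_n_b
-- ===== SOURCE A (Python) =====
-- def find_a_n_b(a_n_b, dict_set_pool):
--     sets = [s for k, s in dict_set_pool.items() if k in a_n_b]
--     if len(sets) > 1:
--         s = sets[0]
--         for s1 in sets[1:]:
--             s = s.intersection(s1)
--         return s
--     elif len(sets) == 1:
--         return sets[0]
--     return None
-- ===== SOURCE B (Python) =====
-- def find_a_n_b(a_n_b, dict_set_pool):
--     sets = [s for k, s in dict_set_pool.items() if k in a_n_b]
--     if not sets: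
--         return None
--     if len(sets) == 1:
--         return sets[0]
--     counts = {}
--     for s in sets:
--         for e in s:
--             counts[e] = counts.get(e, 0) + 1
--     n = len(sets)
--     return {e for e, c in counts.items() if c == n}
-- ===== Notes on version B (the rewrite author's own statement) =====
-- stated objective: alternative
-- what changed: The pairwise fold of set.intersection over the selected sets is replaced by a single occurrence-counting pass: one dict counts every element of every selected set and the result is the elements whose count equals the number of sets (valid because set elements are unique); the empty/single-set cases are kept verbatim.
import Mathlib
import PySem

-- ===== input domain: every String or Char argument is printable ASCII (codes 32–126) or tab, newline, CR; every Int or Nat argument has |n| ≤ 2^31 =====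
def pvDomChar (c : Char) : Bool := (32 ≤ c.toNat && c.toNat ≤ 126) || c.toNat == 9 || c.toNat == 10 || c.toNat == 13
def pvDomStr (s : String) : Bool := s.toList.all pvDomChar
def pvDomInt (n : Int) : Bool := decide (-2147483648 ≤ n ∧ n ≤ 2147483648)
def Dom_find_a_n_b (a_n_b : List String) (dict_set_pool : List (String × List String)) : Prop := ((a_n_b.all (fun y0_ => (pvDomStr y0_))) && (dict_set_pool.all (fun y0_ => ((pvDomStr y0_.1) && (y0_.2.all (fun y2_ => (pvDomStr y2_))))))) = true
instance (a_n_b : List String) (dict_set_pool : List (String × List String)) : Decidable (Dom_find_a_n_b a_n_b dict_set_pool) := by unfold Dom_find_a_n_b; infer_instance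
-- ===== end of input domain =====

-- B replaces the pairwise set.intersection fold with a single occurrence-counting pass
-- (a dict of element counts; the result is the elements counted once per selected set);
-- an alternative of the same cost, not claimed faster.

-- ===== PORT A =====
-- sets = [s for k, s in dict_set_pool.items() if k in a_n_b]; fold of s.intersection(s1)
-- over sets[1:], starting from sets[0] (sets[0] is safe under the length guards: headI).
def find_a_n_b (a_n_b : List String) (dict_set_pool : List (String × List String)) : Option (List String) :=
  let sets := (dict_set_pool.filter (fun p => decide (p.1 ∈ a_n_b))).map Prod.snd
  if 1 < sets.length then
    some ((sets.drop 1).foldl (fun s s1 => PySem.Set.inter s s1) sets.headI)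
  else if sets.length = 1 then
    some sets.headI
  else
    none

-- ===== PORT B =====
-- same selection of sets; empty/single cases verbatim; otherwise one counting pass over
-- all elements of all selected sets, then the set of elements whose count is len(sets).
def find_a_n_b_alt (a_n_b : List String) (dict_set_pool : List (String × List String)) : Option (List String) :=
  let sets := (dict_set_pool.filter (fun p => decide (p.1 ∈ a_n_b))).map Prod.snd
  if sets.isEmpty then
    none
  else if sets.length = 1 then
    some sets.headI
  else
    let counts := sets.foldl
      (fun d s => s.foldl (fun d e => PySem.Dict.modify d e 0 (· + 1)) d)
      (PySem.Dict.empty : PySem.Dict String Int)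
    some (PySem.Set.ofList
      ((counts.items.filter (fun p => p.2 == (sets.length : Int))).map Prod.fst))

-- ===== PRECONDITION & SPEC =====
-- Pre_ only demands that the arguments are valid encodings under the type convention:
-- dict_set_pool encodes a dict (distinct keys, insertion order) whose values encode
-- Python sets (distinct elements). Python A never raises; lists with repeated keys or
-- repeated set elements do not arise from any Python dict[str, set[str]].
def Pre_find_a_n_b (a_n_b : List String) (dict_set_pool : List (String × List String)) : Prop :=
  (dict_set_pool.map Prod.fst).Nodup ∧ ∀ p ∈ dict_set_pool, p.2.Nodup
instance (a_n_b : List String) (dict_set_pool : List (String × List String)) : Decidable (Pre_find_a_n_b a_n_b dict_set_pool) := by unfold Pre_find_a_n_b; infer_instance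

def pvWitness_find_a_n_b : List String × (List (String × List String)) :=
  (["a", "b"], [("a", ["x", "y"]), ("b", ["y", "z"])])

def Spec_find_a_n_b (a_n_b : List String) (dict_set_pool : List (String × List String)) (out : Option (List String)) : Prop := out = find_a_n_b_alt a_n_b dict_set_pool
instance (a_n_b : List String) (dict_set_pool : List (String × List String)) (out : Option (List String)) : Decidable (Spec_find_a_n_b a_n_b dict_set_pool out) := by unfold Spec_find_a_n_b; infer_instance

-- ===== CLAIM (what is proved, stated in full; the proofs are below) =====
def Claim_equal_find_a_n_b : Prop := ∀ (a_n_b : List String) (dict_set_pool : List (String × List String)), Dom_find_a_n_b a_n_b dict_set_pool → Pre_find_a_n_b a_n_b dict_set_pool → Spec_find_a_n_b a_n_b dict_set_pool (find_a_n_b a_n_b dict_set_pool)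

-- ===== LEMMAS AND PROOFS =====

-- A's fold of intersections over rest, seeded with s0, is one filter over s0.
theorem foldl_inter_eq_filter (rest : List (List String)) (s0 : List String) :
    rest.foldl (fun s s1 => PySem.Set.inter s s1) s0
      = s0.filter (fun e => rest.all (fun s => s.contains e)) := by
  induction rest generalizing s0 with
  | nil => simp
  | cons s rest ih =>
      rw [List.foldl_cons, ih]
      simp only [PySem.Set.inter, List.filter_filter, List.all_cons]
      refine List.filter_congr ?_
      intro e _
      simp [Bool.and_comm]

-- Counting over nodup lists: the total count over the concatenation is at most the
-- number of lists, …
theorem count_flatten_le (sets : List (List String)) (h : ∀ s ∈ sets, s.Nodup) (e : String) :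
    sets.flatten.count e ≤ sets.length := by
  induction sets with
  | nil => simp
  | cons s rest ih =>
      have hs : s.count e ≤ 1 := List.nodup_iff_count_le_one.1 (h s (by simp)) e
      have := ih (fun t ht => h t (by simp [ht]))
      simp only [List.flatten_cons, List.count_append, List.length_cons]
      omega

-- … and it reaches the number of lists exactly when e lies in every list.
theorem count_flatten_eq_iff (sets : List (List String)) (h : ∀ s ∈ sets, s.Nodup) (e : String) :
    sets.flatten.count e = sets.length ↔ ∀ s ∈ sets, e ∈ s := by
  induction sets with
  | nil => simp
  | cons s rest ih =>
      have hs : s.count e ≤ 1 := List.nodup_iff_count_le_one.1 (h s (by simp)) e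
      have hrest := count_flatten_le rest (fun t ht => h t (by simp [ht])) e
      have ihr := ih (fun t ht => h t (by simp [ht]))
      simp only [List.flatten_cons, List.count_append, List.length_cons, List.mem_cons,
        forall_eq_or_imp]
      constructor
      · intro hsum
        have h1 : s.count e = 1 := by omega
        have h2 : rest.flatten.count e = rest.length := by omega
        exact ⟨List.count_pos_iff.1 (by omega), ihr.1 h2⟩
      · rintro ⟨hmem, hall⟩
        have h1 : 1 ≤ s.count e := List.count_pos_iff.2 hmem
        have h2 : rest.flatten.count e = rest.length := ihr.2 hall
        omega

-- First-occurrence dedup of s0 ++ t, filtered by a predicate implying membership in s0,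
-- is just the filter of s0 (s0 nodup).
theorem ofList_append_filter (s0 t : List String) (P : String → Bool)
    (hnd : s0.Nodup) (hP : ∀ e, P e = true → e ∈ s0) :
    (PySem.Set.ofList (s0 ++ t)).filter P = s0.filter P := by
  rw [PySem.Set.ofList_append, PySem.Set.update_eq_append_filter,
    PySem.Set.ofList_eq_self_of_nodup _ hnd, List.filter_append, List.filter_filter]
  have h0 : ((PySem.Set.ofList t).filter fun y => P y && !PySem.Set.contains s0 y) = [] := by
    rw [List.filter_eq_nil_iff]
    intro a _ hcontra
    simp only [Bool.and_eq_true, Bool.not_eq_true', PySem.Set.contains_eq_listContains,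
      List.contains_eq_mem, decide_eq_false_iff_not] at hcontra
    exact hcontra.2 (hP a hcontra.1)
  rw [h0, List.append_nil]

-- The branch structure of the two ports, for an arbitrary list of selected (nodup) sets.
theorem core (sets : List (List String)) (hnd : ∀ s ∈ sets, s.Nodup) :
    (if 1 < sets.length then
      some ((sets.drop 1).foldl (fun s s1 => PySem.Set.inter s s1) sets.headI)
    else if sets.length = 1 then some sets.headI else none)
    = (if sets.isEmpty then none
       else if sets.length = 1 then some sets.headI
       else some (PySem.Set.ofList
         ((((sets.foldl
              (fun d s => s.foldl (fun d e => PySem.Dict.modify d e 0 (· + 1)) d)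
              (PySem.Dict.empty : PySem.Dict String Int)).items.filter
            (fun p => p.2 == (sets.length : Int))).map Prod.fst)))) := by
  match sets, hnd with
  | [], _ => rfl
  | [s], _ => rfl
  | s0 :: s1 :: rest, hnd =>
    have hlen : ¬ (s0 :: s1 :: rest).length = 1 := by simp
    rw [if_pos (by simp only [List.length_cons]; omega), if_neg (by simp), if_neg hlen]
    refine congrArg some ?_
    -- A side: fold of intersections = one filter over s0
    rw [List.drop_one, List.tail_cons, foldl_inter_eq_filter, List.headI_cons]
    -- B side: the nested fold is Counter of the flattened sets
    rw [← List.foldl_flatten, ← PySem.Dict.counter_eq_foldl, PySem.Dict.items_counter,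
      List.filter_map, List.map_map]
    have hfst : (Prod.fst ∘ fun k => (k, ((s0 :: s1 :: rest).flatten.count k : Int))) = id := rfl
    rw [hfst, List.map_id]
    have hs0 : s0.Nodup := hnd s0 (by simp)
    -- the count-= -length predicate implies membership in s0
    have hP : ∀ e, (((fun p => p.2 == ((s0 :: s1 :: rest).length : Int)) ∘
        fun k => (k, ((s0 :: s1 :: rest).flatten.count k : Int))) e = true) → e ∈ s0 := by
      intro e he
      simp only [Function.comp_apply, beq_iff_eq, Nat.cast_inj] at he
      exact ((count_flatten_eq_iff _ hnd e).1 he) s0 (by simp)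
    rw [show (s0 :: s1 :: rest).flatten = s0 ++ (s1 :: rest).flatten from rfl] at hP ⊢
    rw [ofList_append_filter s0 _ _ hs0 hP]
    -- the filtered list is nodup, so the final set() is the identity
    rw [PySem.Set.ofList_eq_self_of_nodup _ (hs0.filter _)]
    -- pointwise, count = number of sets means membership in every later set
    refine List.filter_congr ?_
    intro e he
    apply Bool.coe_iff_coe.mp
    simp only [Function.comp_apply, beq_iff_eq, Nat.cast_inj, List.all_eq_true]
    rw [show s0 ++ (s1 :: rest).flatten = (s0 :: s1 :: rest).flatten from rfl]
    constructor
    · intro hall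
      refine (count_flatten_eq_iff _ hnd e).2 ?_
      intro s hs
      rcases List.mem_cons.1 hs with rfl | hs
      · exact he
      · simpa using hall s hs
    · intro hc s hs
      simpa using ((count_flatten_eq_iff _ hnd e).1 hc) s (List.mem_cons_of_mem _ hs)

-- ===== VERDICT (by name: the statement is the Claim_ definition above) =====
theorem find_a_n_b_spec : Claim_equal_find_a_n_b := by
  intro a_n_b pool _ hpre
  unfold Spec_find_a_n_b find_a_n_b find_a_n_b_alt
  have hnd : ∀ s ∈ (pool.filter (fun p => decide (p.1 ∈ a_n_b))).map Prod.snd, s.Nodup := by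
    intro s hs
    obtain ⟨p, hp, rfl⟩ := List.mem_map.1 hs
    exact hpre.2 p (List.mem_filter.1 hp).1
  exact core _ hnd
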